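-- pv_equiv track=rewrite | github.com/zorion/acm-uva | advent-of-code/2024/day07/part2.py | solve_eq
-- ===== SOURCE A (Python) =====
-- def solve_eq(acc: int, target: int, steps: list[int]) -> bool:
--     if not steps:
--         return acc == target
--     for f in [add, mul, conc]:
--         res = f(acc, steps[0])
--         if solve_eq(res, target, steps[1:]):
--             return True
--     return False
--
-- def mul(a: int, b: int) -> int:
--     return a * b
--
-- def add(a: int, b: int) -> int:
--     return a + b
--
-- def conc(a: int, b: int) -> int:
--     return int(str(a) + str(b))
-- ===== SOURCE B (Python) =====
-- def solve_eq(acc: int, target: int, steps: list[int]) -> bool: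
--     frontier = {acc}
--     for s in steps:
--         frontier = {f(v, s) for v in frontier for f in (add, mul, conc)}
--     return target in frontier
--
-- def mul(a: int, b: int) -> int:
--     return a * b
--
-- def add(a: int, b: int) -> int:
--     return a + b
--
-- def conc(a: int, b: int) -> int:
--     return int(str(a) + str(b))
-- ===== Notes on version B (the rewrite author's own statement) =====
-- stated objective: alternative
-- what changed: Replaces the top-down recursion with early return by an iterative breadth-first reachability search that maintains a frontier set of all accumulator values attainable after each step, deduplicating values as it goes, and finally tests membership of the target.
-- outside the precondition, e.g. on solve_eq(1, 0, [-1]): A returns True, B raises ValueError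
import Mathlib
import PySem

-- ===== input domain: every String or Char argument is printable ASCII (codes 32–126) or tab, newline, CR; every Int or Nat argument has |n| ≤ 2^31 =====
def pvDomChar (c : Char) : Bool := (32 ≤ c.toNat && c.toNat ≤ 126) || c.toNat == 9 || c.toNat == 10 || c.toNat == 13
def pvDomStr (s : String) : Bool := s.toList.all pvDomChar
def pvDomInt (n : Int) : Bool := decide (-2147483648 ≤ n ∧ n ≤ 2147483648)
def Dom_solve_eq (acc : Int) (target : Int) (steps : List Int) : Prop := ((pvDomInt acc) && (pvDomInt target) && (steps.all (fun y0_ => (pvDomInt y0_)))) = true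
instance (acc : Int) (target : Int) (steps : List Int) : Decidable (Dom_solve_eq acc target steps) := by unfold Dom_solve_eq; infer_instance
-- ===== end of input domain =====

-- B replaces A's depth-first recursion by an iterative frontier-set reachability search; return value only.
-- ===== PORT A =====
def pyAdd (a b : Int) : Int := a + b
def pyMul (a b : Int) : Int := a * b
-- conc = int(str(a) + str(b)); Python raises ValueError iff b < 0 (excluded by Pre_); the .getD 0 is never reached inside Pre_.
def pyConc (a b : Int) : Int := (PySem.Int.ofChars? (PySem.Int.toChars a ++ PySem.Int.toChars b)).getD 0

def solve_eq (acc : Int) (target : Int) (steps : List Int) : Bool :=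
  match steps with
  | [] => acc == target
  | s :: rest => [pyAdd, pyMul, pyConc].any (fun f => solve_eq (f acc s) target rest)

-- ===== PORT B =====
def solve_eq_alt (acc : Int) (target : Int) (steps : List Int) : Bool :=
  let frontier := steps.foldl
    (fun fr s => PySem.Set.ofList (fr.flatMap (fun v => [pyAdd v s, pyMul v s, pyConc v s])))
    (PySem.Set.ofList [acc])
  PySem.Set.contains frontier target

-- ===== PRECONDITION & SPEC =====
-- Pre_ excludes steps containing a negative value: there conc builds a string like "5-3" and
-- int() raises ValueError, so A (and B) raise unless an earlier add/mul branch already succeeded.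
def Pre_solve_eq (acc : Int) (target : Int) (steps : List Int) : Prop := ∀ s ∈ steps, 0 ≤ s
instance (acc : Int) (target : Int) (steps : List Int) : Decidable (Pre_solve_eq acc target steps) := by unfold Pre_solve_eq; infer_instance
def pvWitness_solve_eq : Int × Int × List Int := (3, 9, [2, 3])

def Spec_solve_eq (acc : Int) (target : Int) (steps : List Int) (out : Bool) : Prop := out = solve_eq_alt acc target steps
instance (acc : Int) (target : Int) (steps : List Int) (out : Bool) : Decidable (Spec_solve_eq acc target steps out) := by unfold Spec_solve_eq; infer_instance

-- ===== CLAIM (what is proved, stated in full; the proofs are below) =====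
def Claim_equal_solve_eq : Prop := ∀ (acc : Int) (target : Int) (steps : List Int), Dom_solve_eq acc target steps → Pre_solve_eq acc target steps → Spec_solve_eq acc target steps (solve_eq acc target steps)

-- ===== LEMMAS AND PROOFS =====

-- the per-step frontier image used by solve_eq_alt
def pvStep (fr : List Int) (s : Int) : PySem.Set Int :=
  PySem.Set.ofList (fr.flatMap (fun v => [pyAdd v s, pyMul v s, pyConc v s]))

lemma pvStep_mem (fr : List Int) (s w : Int) :
    w ∈ pvStep fr s ↔ ∃ v ∈ fr, w = pyAdd v s ∨ w = pyMul v s ∨ w = pyConc v s := by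
  simp only [pvStep, PySem.Set.mem_ofList, List.mem_flatMap, List.mem_cons,
    List.not_mem_nil, or_false]

lemma solve_eq_cons (acc target s : Int) (rest : List Int) :
    solve_eq acc target (s :: rest) =
      (solve_eq (pyAdd acc s) target rest || solve_eq (pyMul acc s) target rest ||
       solve_eq (pyConc acc s) target rest) := by
  simp [solve_eq, List.any, Bool.or_assoc]

lemma frontier_invariant (target : Int) (steps : List Int) :
    ∀ fr : List Int,
      (PySem.Set.contains (steps.foldl pvStep fr) target = true ↔
        ∃ v ∈ fr, solve_eq v target steps = true) := by
  induction steps with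
  | nil =>
    intro fr
    simp [solve_eq, PySem.Set.contains]
  | cons s rest ih =>
    intro fr
    rw [List.foldl_cons, ih (pvStep fr s)]
    constructor
    · rintro ⟨w, hw, hsolve⟩
      rcases (pvStep_mem fr s w).mp hw with ⟨v, hv, h⟩
      refine ⟨v, hv, ?_⟩
      rw [solve_eq_cons]
      rcases h with h | h | h <;> subst h <;> simp [hsolve]
    · rintro ⟨v, hv, hsolve⟩
      rw [solve_eq_cons] at hsolve
      rcases Bool.or_eq_true_iff.mp hsolve with h | h
      · rcases Bool.or_eq_true_iff.mp h with h | h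
        · exact ⟨pyAdd v s, (pvStep_mem fr s _).mpr ⟨v, hv, Or.inl rfl⟩, h⟩
        · exact ⟨pyMul v s, (pvStep_mem fr s _).mpr ⟨v, hv, Or.inr (Or.inl rfl)⟩, h⟩
      · exact ⟨pyConc v s, (pvStep_mem fr s _).mpr ⟨v, hv, Or.inr (Or.inr rfl)⟩, h⟩

-- ===== VERDICT (by name: the statement is the Claim_ definition above) =====
theorem solve_eq_spec : Claim_equal_solve_eq := by
  intro acc target steps _ _
  unfold Spec_solve_eq solve_eq_alt
  have h := frontier_invariant target steps (PySem.Set.ofList [acc])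
  have : (∃ v ∈ PySem.Set.ofList [acc], solve_eq v target steps = true) ↔
      solve_eq acc target steps = true := by
    simp [PySem.Set.mem_ofList]
  rw [this] at h
  show solve_eq acc target steps =
    PySem.Set.contains (steps.foldl pvStep (PySem.Set.ofList [acc])) target
  cases hb : solve_eq acc target steps
  · cases hc : PySem.Set.contains (steps.foldl pvStep (PySem.Set.ofList [acc])) target
    · rfl
    · rw [h.mp hc] at hb; exact hb.symm
  · exact (h.mpr hb).symm
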